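-- pv_equiv track=rewrite | github.com/UpSnow/Python | Python/PythonDef/DEFLETRASREPETIDAS.py | LetrasRepetidas
-- ===== SOURCE A (Python) =====
-- def LetrasRepetidas (palavra):
--     p = palavra.lower()
--     retorno = []
--     for i in range(len(p)):
--         if(p[i] in p[i+1:]):
--             v = p[i]
--             if(v not in retorno):
--                 retorno.append(v)
--     return retorno
-- ===== SOURCE B (Python) =====
-- def LetrasRepetidas(palavra):
--     p = palavra.lower()
--     seen = set()
--     dups = set()
--     for ch in p:
--         if ch in seen:
--             dups.add(ch)
--         else:
--             seen.add(ch)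
--     retorno = []
--     for ch in p:
--         if ch in dups and ch not in retorno:
--             retorno.append(ch)
--     return retorno
-- ===== Notes on version B (the rewrite author's own statement) =====
-- stated objective: faster
-- what changed: Replaces A's per-index suffix membership scan (p[i] in p[i+1:]) with one set-based pass collecting duplicated characters plus an ordered emit pass, so the quadratic substring scans disappear.
import Mathlib
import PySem

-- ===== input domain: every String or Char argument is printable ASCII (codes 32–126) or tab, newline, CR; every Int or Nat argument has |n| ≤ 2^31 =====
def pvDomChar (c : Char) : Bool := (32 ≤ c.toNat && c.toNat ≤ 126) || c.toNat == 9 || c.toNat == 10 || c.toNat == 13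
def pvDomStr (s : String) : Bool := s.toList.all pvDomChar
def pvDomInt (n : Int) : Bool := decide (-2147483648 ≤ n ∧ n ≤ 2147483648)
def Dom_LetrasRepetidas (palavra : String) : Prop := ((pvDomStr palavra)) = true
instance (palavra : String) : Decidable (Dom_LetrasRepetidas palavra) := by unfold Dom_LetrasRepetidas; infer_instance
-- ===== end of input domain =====

-- B replaces A's per-index suffix scan (p[i] in p[i+1:]) with a set-based duplicate pass
-- plus an ordered emit pass.

-- ===== PORT A =====
-- literal transliteration of A: for i in range(len(p)): if p[i] in p[i+1:] and p[i] not in retorno: append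
def LetrasRepetidas (palavra : String) : List String :=
  let p := PySem.Str.lower palavra
  (PySem.List.pyRange 0 (PySem.Str.len p) 1).foldl
    (fun retorno i =>
      match PySem.Str.pyGet? p i with
      | none => retorno   -- unreachable: i ∈ range(len(p))
      | some c =>
        if PySem.Str.isIn (String.ofList [c]) (PySem.Str.slice p (some (i + 1)) none) then
          let v := String.ofList [c]
          if v ∉ retorno then retorno ++ [v] else retorno
        else retorno)
    []

-- ===== PORT B =====
-- literal transliteration of Source B: one pass building (seen, dups), then an ordered emit pass
def LetrasRepetidas_alt (palavra : String) : List String :=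
  let p := (PySem.Str.lower palavra).toList
  let sd := p.foldl
    (fun (sd : PySem.Set Char × PySem.Set Char) ch =>
      if PySem.Set.contains sd.1 ch then (sd.1, PySem.Set.add sd.2 ch)
      else (PySem.Set.add sd.1 ch, sd.2))
    (PySem.Set.empty, PySem.Set.empty)
  p.foldl
    (fun retorno ch =>
      if PySem.Set.contains sd.2 ch ∧ String.ofList [ch] ∉ retorno
      then retorno ++ [String.ofList [ch]] else retorno)
    []

-- ===== PRECONDITION & SPEC =====
def Spec_LetrasRepetidas (palavra : String) (out : List String) : Prop := out = LetrasRepetidas_alt palavra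
instance (palavra : String) (out : List String) : Decidable (Spec_LetrasRepetidas palavra out) := by unfold Spec_LetrasRepetidas; infer_instance

-- ===== CLAIM (what is proved, stated in full; the proofs are below) =====
def Claim_equal_LetrasRepetidas : Prop := ∀ (palavra : String), Dom_LetrasRepetidas palavra → Spec_LetrasRepetidas palavra (LetrasRepetidas palavra)

-- ===== LEMMAS AND PROOFS =====

-- A's loop body (the lambda of the port, named for the proofs)
def fA (P : String) (retorno : List String) (i : Int) : List String :=
  match PySem.Str.pyGet? P i with
  | none => retorno
  | some c =>
    if PySem.Str.isIn (String.ofList [c]) (PySem.Str.slice P (some (i + 1)) none) then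
      let v := String.ofList [c]
      if v ∉ retorno then retorno ++ [v] else retorno
    else retorno

-- A's index loop, re-expressed structurally on the suffix still to visit
def aFold : List Char → List String → List String
  | [], acc => acc
  | c :: rest, acc =>
      aFold rest (if c ∈ rest ∧ String.ofList [c] ∉ acc then acc ++ [String.ofList [c]] else acc)

-- A's range-fold over indices pre.length .. len equals aFold on the corresponding suffix
theorem aFold_eq_range (P : String) :
    ∀ (suf pre : List Char) (acc : List String), P.toList = pre ++ suf →
    (PySem.List.pyRange (pre.length : Int) (PySem.Str.len P) 1).foldl (fA P) acc
      = aFold suf acc := by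
  intro suf
  induction suf with
  | nil =>
    intro pre acc h
    rw [PySem.List.pyRange_one_eq_nil (by simp [PySem.Str.len_eq, h])]
    rfl
  | cons c rest ih =>
    intro pre acc h
    have hlen : (pre.length : Int) < PySem.Str.len P := by
      simp [PySem.Str.len_eq, h]
    rw [PySem.List.pyRange_one_cons hlen, List.foldl_cons]
    have hget : PySem.Str.pyGet? P (pre.length : Int) = some c := by
      rw [PySem.Str.pyGet?_natCast, h, List.getElem?_append_right le_rfl]
      simp
    have hsplit : P.toList = (pre ++ [c]) ++ rest := by simp [h]
    have hslice : (PySem.Str.slice P (some ((pre.length : Int) + 1)) none).toList = rest := by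
      rw [PySem.Str.toList_slice, PySem.Chars.slice_eq_listSlice,
        show ((pre.length : Int) + 1) = ((pre.length + 1 : Nat) : Int) by push_cast; ring,
        PySem.List.slice_from_natCast, hsplit, List.drop_left' (by simp)]
    have hiff : (PySem.Str.isIn (String.ofList [c])
        (PySem.Str.slice P (some ((pre.length : Int) + 1)) none) = true) ↔ c ∈ rest := by
      rw [PySem.Str.isIn_iff_infix, hslice]
      simp [String.toList_ofList, List.singleton_infix_iff]
    have hcast : (pre.length : Int) + 1 = (((pre ++ [c]).length : Nat) : Int) := by
      simp
    have hbody : ∀ acc0, fA P acc0 (pre.length : Int)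
        = if c ∈ rest ∧ String.ofList [c] ∉ acc0 then acc0 ++ [String.ofList [c]] else acc0 := by
      intro acc0
      simp only [fA, hget, hiff]
      by_cases hr : c ∈ rest
      · by_cases hm : String.ofList [c] ∈ acc0 <;> simp [hr, hm]
      · simp [hr]
    rw [hbody, hcast, ih (pre ++ [c]) _ hsplit]
    rfl

-- membership in the dups set of B's first pass
theorem dups_mem (l : List Char) :
    ∀ (s d : PySem.Set Char) (c : Char),
    (c ∈ (l.foldl
      (fun (sd : PySem.Set Char × PySem.Set Char) ch =>
        if PySem.Set.contains sd.1 ch then (sd.1, PySem.Set.add sd.2 ch)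
        else (PySem.Set.add sd.1 ch, sd.2))
      (s, d)).2) ↔ c ∈ d ∨ (c ∈ s ∧ c ∈ l) ∨ 2 ≤ l.count c := by
  induction l with
  | nil => intro s d c; simp
  | cons x rest ih =>
    intro s d c
    rw [List.foldl_cons]
    by_cases hx : x ∈ s
    · rw [if_pos (by simpa [PySem.Set.contains_iff] using hx)]
      rw [ih]
      by_cases hcx : c = x
      · subst hcx
        simp [PySem.Set.mem_add, hx]
      · have hxc : ¬ x = c := fun hh => hcx hh.symm
        simp [PySem.Set.mem_add, hcx, hxc]
    · rw [if_neg (by simpa [PySem.Set.contains_iff] using hx)]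
      rw [ih]
      by_cases hcx : c = x
      · subst hcx
        have h1 : c ∈ PySem.Set.add s c := (PySem.Set.mem_add s c c).mpr (Or.inr rfl)
        have hcount : List.count c (c :: rest) = List.count c rest + 1 := by
          simp
        constructor
        · rintro (h | ⟨_, hr⟩ | h)
          · exact Or.inl h
          · right; right; rw [hcount]
            have := List.count_pos_iff.mpr hr; omega
          · right; right; rw [hcount]; omega
        · rintro (h | ⟨hs, _⟩ | h)
          · exact Or.inl h
          · exact absurd hs hx
          · right; left
            refine ⟨h1, List.count_pos_iff.mp ?_⟩
            rw [hcount] at h; omega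
      · have hxc : ¬ x = c := fun hh => hcx hh.symm
        simp [PySem.Set.mem_add, hcx, hxc]

-- aFold equals the count-based emit fold, given the first-occurrence invariant on the prefix
theorem aFold_eq_count (p : List Char) :
    ∀ (suf pre : List Char) (acc : List String), p = pre ++ suf →
    (∀ c, c ∈ pre → 2 ≤ p.count c → String.ofList [c] ∈ acc) →
    aFold suf acc = suf.foldl
      (fun retorno ch =>
        if 2 ≤ p.count ch ∧ String.ofList [ch] ∉ retorno
        then retorno ++ [String.ofList [ch]] else retorno) acc := by
  intro suf
  induction suf with
  | nil => intro pre acc _ _; rfl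
  | cons c rest ih =>
    intro pre acc h hinv
    rw [List.foldl_cons]
    have hsplit : p.count c = pre.count c + (rest.count c + 1) := by
      subst h; simp [List.count_append]
    have hacc' : (if c ∈ rest ∧ String.ofList [c] ∉ acc then acc ++ [String.ofList [c]] else acc)
        = (if 2 ≤ p.count c ∧ String.ofList [c] ∉ acc then acc ++ [String.ofList [c]] else acc) := by
      by_cases hp : c ∈ pre
      · have h2 : 2 ≤ p.count c := by
          have := List.count_pos_iff.mpr hp
          omega
        have hm := hinv c hp h2
        simp [hm, h2]
      · have h0 : pre.count c = 0 := List.count_eq_zero.mpr hp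
        have hcr : (c ∈ rest) ↔ 2 ≤ p.count c := by
          rw [← List.count_pos_iff]; omega
        simp only [hcr]
    show aFold rest _ = _
    rw [hacc']
    apply ih (pre ++ [c]) _ (by simp [h])
    intro c' hc' h2
    rcases List.mem_append.mp hc' with hc' | hc'
    · have := hinv c' hc' h2
      split <;> simp [this]
    · have hcc : c' = c := by simpa using hc'
      subst hcc
      by_cases hm : String.ofList [c'] ∈ acc
      · split <;> simp [hm]
      · rw [if_pos ⟨h2, hm⟩]
        simp

-- the characters of B's dups set are exactly those with count ≥ 2
theorem dups_spec (l : List Char) (ch : Char) :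
    PySem.Set.contains
      ((l.foldl
        (fun (sd : PySem.Set Char × PySem.Set Char) ch =>
          if PySem.Set.contains sd.1 ch then (sd.1, PySem.Set.add sd.2 ch)
          else (PySem.Set.add sd.1 ch, sd.2))
        (PySem.Set.empty, PySem.Set.empty)).2) ch = true ↔ 2 ≤ l.count ch := by
  rw [PySem.Set.contains_iff, dups_mem]
  simp [PySem.Set.empty]

-- port A, re-expressed as aFold over the lowered characters
theorem A_eq_aFold (palavra : String) :
    LetrasRepetidas palavra = aFold (PySem.Str.lower palavra).toList [] := by
  show (PySem.List.pyRange ((([] : List Char).length : Nat) : Int)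
      (PySem.Str.len (PySem.Str.lower palavra)) 1).foldl (fA (PySem.Str.lower palavra)) []
      = aFold (PySem.Str.lower palavra).toList []
  exact aFold_eq_range (PySem.Str.lower palavra) (PySem.Str.lower palavra).toList [] [] (by simp)

-- port B, re-expressed as the count-based emit fold
theorem B_eq_count (palavra : String) :
    LetrasRepetidas_alt palavra
      = (PySem.Str.lower palavra).toList.foldl
        (fun retorno ch =>
          if 2 ≤ (PySem.Str.lower palavra).toList.count ch ∧ String.ofList [ch] ∉ retorno
          then retorno ++ [String.ofList [ch]] else retorno) [] := by
  simp only [LetrasRepetidas_alt]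
  apply PySem.List.foldl_congr_mem
  intro acc x _
  simp only [dups_spec]

-- ===== VERDICT (by name: the statement is the Claim_ definition above) =====
theorem LetrasRepetidas_spec : Claim_equal_LetrasRepetidas := by
  intro palavra _
  show LetrasRepetidas palavra = LetrasRepetidas_alt palavra
  rw [A_eq_aFold, B_eq_count]
  exact aFold_eq_count (PySem.Str.lower palavra).toList (PySem.Str.lower palavra).toList [] []
    rfl (by simp)
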